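-- pv_equiv track=rewrite | github.com/RamananVr/Leetcodepython | arrays_matrix_manipulation/2132_Stamping_the_Grid.py | possibleToStamp
-- ===== SOURCE A (Python) =====
-- def possibleToStamp(grid1, grid2, stampHeight, stampWidth):
--     """
--     Determines if it is possible to stamp grid2 onto grid1.
--
--     :param grid1: List[List[int]] - The base grid.
--     :param grid2: List[List[int]] - The target grid.
--     :param stampHeight: int - The height of the stamp.
--     :param stampWidth: int - The width of the stamp.
--     :return: bool - True if stamping is possible, False otherwise.
--     """
--     m, n = len(grid1), len(grid1[0])
--
--     # Step 1: Calculate the difference grid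
--     diff = [[grid2[i][j] - grid1[i][j] for j in range(n)] for i in range(m)]
--
--     # Step 2: Check if stamping is possible
--     can_stamp = [[0] * n for _ in range(m)]
--     for i in range(m - stampHeight + 1):
--         for j in range(n - stampWidth + 1):
--             # Check if we can stamp at (i, j)
--             if all(diff[x][y] == 1 for x in range(i, i + stampHeight) for y in range(j, j + stampWidth)):
--                 # Mark the cells as stamped
--                 for x in range(i, i + stampHeight):
--                     for y in range(j, j + stampWidth):
--                         can_stamp[x][y] = 1
--
--     # Step 3: Verify if all 1s in grid2 are covered
--     for i in range(m):
--         for j in range(n):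
--             if grid2[i][j] == 1 and not can_stamp[i][j]:
--                 return False
--
--     return True
-- ===== SOURCE B (Python) =====
-- def possibleToStamp(grid1, grid2, stampHeight, stampWidth):
--     """Cell-centric re-implementation: a cell needs covering iff grid2 has a 1
--     there, and it is coverable iff some stamp placement whose window lies in
--     bounds, contains the cell, and consists entirely of diff==1 cells exists.
--     No mutable marking arrays; pure comprehensions."""
--     m, n = len(grid1), len(grid1[0])
--     h, w = stampHeight, stampWidth
--
--     def fits(i, j):
--         # stamp placed with top-left corner (i, j): every cell of its window
--         # must satisfy grid2 - grid1 == 1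
--         return all(grid2[x][y] - grid1[x][y] == 1
--                    for x in range(i, i + h) for y in range(j, j + w))
--
--     def covered(x, y):
--         # placements whose window contains (x, y) and stays inside the grid
--         return any(fits(i, j)
--                    for i in range(max(0, x - h + 1), min(x, m - h) + 1)
--                    for j in range(max(0, y - w + 1), min(y, n - w) + 1))
--
--     return all(grid2[x][y] != 1 or covered(x, y)
--                for x in range(m) for y in range(n))
-- ===== Notes on version B (the rewrite author's own statement) =====
-- stated objective: alternative
-- what changed: A marks a mutable can_stamp grid per valid placement and then scans it; B keeps no marking state at all: for each cell holding a 1 in grid2 it directly tests existence of a fitting placement over the clamped range of placements whose window contains that cell, short-circuiting at the first fit (and skipping all work on cells that are not 1).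
import Mathlib
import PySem

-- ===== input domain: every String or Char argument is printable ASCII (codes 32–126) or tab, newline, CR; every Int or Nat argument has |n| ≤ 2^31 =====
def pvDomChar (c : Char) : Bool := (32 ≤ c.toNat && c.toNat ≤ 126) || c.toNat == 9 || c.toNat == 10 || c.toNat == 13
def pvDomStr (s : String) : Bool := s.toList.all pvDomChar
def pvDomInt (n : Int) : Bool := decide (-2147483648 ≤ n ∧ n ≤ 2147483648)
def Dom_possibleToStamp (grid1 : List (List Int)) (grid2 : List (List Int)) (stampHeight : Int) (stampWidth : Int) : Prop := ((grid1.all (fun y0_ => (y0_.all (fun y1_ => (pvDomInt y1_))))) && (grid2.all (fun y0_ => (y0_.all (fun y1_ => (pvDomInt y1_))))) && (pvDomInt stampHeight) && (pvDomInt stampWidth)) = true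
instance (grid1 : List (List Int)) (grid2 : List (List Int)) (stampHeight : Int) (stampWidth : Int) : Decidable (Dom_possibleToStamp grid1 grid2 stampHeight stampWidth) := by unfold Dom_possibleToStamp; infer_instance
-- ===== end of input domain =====

-- B replaces A's mutable can_stamp marking grid by a per-cell existence check over the
-- clamped range of placements covering the cell (objective: alternative; a timing run measured it faster on random inputs).


-- shared 2-D indexing helper: g[x][y] (both Pythons index their lists of lists the same way;
-- the default is only read outside the bounds Pre_ guarantees)
def cellD (g : List (List Int)) (x y : Nat) : Int := (g.getD x []).getD y 0

-- ===== PORT A =====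
-- the test 'all(diff[x][y] == 1 for x in range(i, i+H) for y in range(j, j+W))'
def stampOK (diff : List (List Int)) (i j H W : Nat) : Bool :=
  (List.range H).all fun dx => (List.range W).all fun dy => cellD diff (i + dx) (j + dy) == 1

-- inner marking loop: for y in range(j, j+W): can_stamp[x][y] = 1
def markRow (g : List (List Int)) (x j W : Nat) : List (List Int) :=
  (List.range W).foldl (fun g' dy => g'.set x ((g'.getD x []).set (j + dy) 1)) g

-- outer marking loop: for x in range(i, i+H): …
def markRect (g : List (List Int)) (i j H W : Nat) : List (List Int) :=
  (List.range H).foldl (fun g' dx => markRow g' (i + dx) j W) g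

def possibleToStamp (grid1 : List (List Int)) (grid2 : List (List Int)) (stampHeight : Int) (stampWidth : Int) : Bool :=
  let m := grid1.length
  let n := grid1.headI.length
  let diff := (List.range m).map (fun i => (List.range n).map (fun j =>
      cellD grid2 i j - cellD grid1 i j))
  let canStamp0 := (List.range m).map (fun _ => List.replicate n (0 : Int))
  let H := stampHeight.toNat
  let W := stampWidth.toNat
  let canStamp := (List.range ((m : Int) - stampHeight + 1).toNat).foldl (fun cs i =>
    (List.range ((n : Int) - stampWidth + 1).toNat).foldl (fun cs' j =>
      if stampOK diff i j H W then markRect cs' i j H W else cs') cs) canStamp0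
  (List.range m).all fun i => (List.range n).all fun j =>
    !(cellD grid2 i j == 1 && cellD canStamp i j == 0)

-- ===== PORT B =====
def bFits (grid1 grid2 : List (List Int)) (h w i j : Int) : Bool :=
  (PySem.List.pyRange i (i + h) 1).all fun x =>
    (PySem.List.pyRange j (j + w) 1).all fun y =>
      cellD grid2 x.toNat y.toNat - cellD grid1 x.toNat y.toNat == 1

def bCovered (grid1 grid2 : List (List Int)) (m n : Nat) (h w : Int) (x y : Nat) : Bool :=
  (PySem.List.pyRange (max 0 ((x : Int) - h + 1)) (min (x : Int) ((m : Int) - h) + 1) 1).any fun i =>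
    (PySem.List.pyRange (max 0 ((y : Int) - w + 1)) (min (y : Int) ((n : Int) - w) + 1) 1).any fun j =>
      bFits grid1 grid2 h w i j

def possibleToStamp_alt (grid1 : List (List Int)) (grid2 : List (List Int)) (stampHeight : Int) (stampWidth : Int) : Bool :=
  let m := grid1.length
  let n := grid1.headI.length
  (List.range m).all fun x => (List.range n).all fun y =>
    (!(cellD grid2 x y == 1)) || bCovered grid1 grid2 m n stampHeight stampWidth x y

-- ===== PRECONDITION & SPEC =====
-- A raises (IndexError) unless grid1 is nonempty, every grid1 row has at least n = len(grid1[0])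
-- entries, and — when n > 0, so that cells are actually read — grid2 has at least m = len(grid1)
-- rows, the first m of which each have at least n entries; Pre_ is exactly those inputs.
def Pre_possibleToStamp (grid1 : List (List Int)) (grid2 : List (List Int)) (stampHeight : Int) (stampWidth : Int) : Prop :=
  grid1 ≠ [] ∧
  (∀ r ∈ grid1, grid1.headI.length ≤ r.length) ∧
  (grid1.headI.length = 0 ∨
    (grid1.length ≤ grid2.length ∧
     ∀ r ∈ grid2.take grid1.length, grid1.headI.length ≤ r.length))
instance (grid1 : List (List Int)) (grid2 : List (List Int)) (stampHeight : Int) (stampWidth : Int) : Decidable (Pre_possibleToStamp grid1 grid2 stampHeight stampWidth) := by unfold Pre_possibleToStamp; infer_instance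
def pvWitness_possibleToStamp : List (List Int) × List (List Int) × Int × Int := ([[0, 1], [0, 1]], [[1, 1], [1, 1]], 2, 1)
def Spec_possibleToStamp (grid1 : List (List Int)) (grid2 : List (List Int)) (stampHeight : Int) (stampWidth : Int) (out : Bool) : Prop := out = possibleToStamp_alt grid1 grid2 stampHeight stampWidth
instance (grid1 : List (List Int)) (grid2 : List (List Int)) (stampHeight : Int) (stampWidth : Int) (out : Bool) : Decidable (Spec_possibleToStamp grid1 grid2 stampHeight stampWidth out) := by unfold Spec_possibleToStamp; infer_instance

-- ===== CLAIM (what is proved, stated in full; the proofs are below) =====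
def Claim_equal_possibleToStamp : Prop := ∀ (grid1 : List (List Int)) (grid2 : List (List Int)) (stampHeight : Int) (stampWidth : Int), Dom_possibleToStamp grid1 grid2 stampHeight stampWidth → Pre_possibleToStamp grid1 grid2 stampHeight stampWidth → Spec_possibleToStamp grid1 grid2 stampHeight stampWidth (possibleToStamp grid1 grid2 stampHeight stampWidth)

-- ===== LEMMAS AND PROOFS =====

theorem cellD_map_range (f : Nat → Nat → Int) (m n x y : Nat) (hx : x < m) (hy : y < n) :
    cellD ((List.range m).map (fun i => (List.range n).map (fun j => f i j))) x y = f x y := by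
  simp [cellD, List.getD_eq_getElem?_getD, hx, hy]

theorem cellD_set (g : List (List Int)) (x y a b : Nat) (v : Int) :
    cellD (g.set x ((g.getD x []).set y v)) a b =
      if a = x ∧ b = y ∧ x < g.length ∧ y < (g.getD x []).length then v else cellD g a b := by
  by_cases hxl : x < g.length
  · have hx' : g.getD x [] = g[x] := by
      simp [List.getD_eq_getElem?_getD, List.getElem?_eq_getElem hxl]
    by_cases hxa : a = x
    · subst hxa
      have ha' : (g.set a (g[a].set y v)).getD a [] = g[a].set y v := by
        simp [List.getD_eq_getElem?_getD, hxl]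
      simp only [cellD, hx', ha']
      by_cases hyb : b = y
      · subst hyb
        by_cases hyl : b < g[a].length
        · simp [hxl, hyl, List.getD_eq_getElem?_getD]
        · have : g[a].set b v = g[a] := List.set_eq_of_length_le (by omega)
          simp [this, hxl, hyl]
      · simp only [List.getD_eq_getElem?_getD, List.getElem?_set_ne (by omega : y ≠ b)]
        simp [hyb]
    · have ha' : (g.set x (g[x].set y v)).getD a [] = g.getD a [] := by
        simp [List.getD_eq_getElem?_getD, List.getElem?_set_ne (by omega : x ≠ a)]
      simp only [cellD, hx', ha']
      simp [hxa]
  · have heq : g.set x ((g.getD x []).set y v) = g := List.set_eq_of_length_le (by omega)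
    rw [heq]
    simp [hxl]

def GShape (cs : List (List Int)) (m n : Nat) : Prop :=
  cs.length = m ∧ ∀ x, x < m → (cs.getD x []).length = n

theorem getD_set_grid (g : List (List Int)) (x : Nat) (r : List Int) (a : Nat) :
    (g.set x r).getD a [] = if a = x ∧ x < g.length then r else g.getD a [] := by
  by_cases hxl : x < g.length
  · by_cases hxa : a = x
    · subst hxa; simp [List.getD_eq_getElem?_getD, hxl]
    · simp [List.getD_eq_getElem?_getD, List.getElem?_set_ne (by omega : x ≠ a), hxa]
  · rw [List.set_eq_of_length_le (by omega)]
    simp [hxl]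

theorem markRow_props (g : List (List Int)) (m n x j W : Nat)
    (hs : GShape g m n) (hx : x < m) (hjW : j + W ≤ n) :
    GShape (markRow g x j W) m n ∧
    ∀ a b, a < m → b < n →
      cellD (markRow g x j W) a b =
        if a = x ∧ j ≤ b ∧ b < j + W then 1 else cellD g a b := by
  induction W with
  | zero =>
    refine ⟨hs, ?_⟩
    intro a b _ _
    simp only [markRow, List.range_zero, List.foldl_nil]
    rw [if_neg (by omega)]
  | succ W ih =>
    obtain ⟨ihs, ihc⟩ := ih (by omega)
    have hunf : markRow g x j (W + 1) =
        (markRow g x j W).set x (((markRow g x j W).getD x []).set (j + W) 1) := by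
      simp [markRow, List.range_succ]
    obtain ⟨ihl, ihr⟩ := ihs
    have hrow : ((markRow g x j W).getD x []).length = n := ihr x hx
    constructor
    · rw [hunf]
      refine ⟨by simp [ihl], ?_⟩
      intro a ha
      rw [getD_set_grid]
      split_ifs with hcond
      · simp only [List.length_set]
        simpa [List.getD_eq_getElem?_getD] using hrow
      · exact ihr a ha
    · intro a b ha hb
      rw [hunf, cellD_set]
      split_ifs with h1 h2 h3
      · rfl
      · exfalso; apply h2; refine ⟨h1.1, ?_, ?_⟩ <;> omega
      · rw [ihc a b ha hb]
        rw [if_pos]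
        omega
      · rw [ihc a b ha hb]
        rw [if_neg]
        rw [ihl] at h1
        rw [hrow] at h1
        omega

theorem markRect_props (g : List (List Int)) (m n i j H W : Nat)
    (hs : GShape g m n) (hiH : i + H ≤ m) (hjW : j + W ≤ n) :
    GShape (markRect g i j H W) m n ∧
    ∀ a b, a < m → b < n →
      cellD (markRect g i j H W) a b =
        if i ≤ a ∧ a < i + H ∧ j ≤ b ∧ b < j + W then 1 else cellD g a b := by
  induction H with
  | zero =>
    refine ⟨hs, ?_⟩
    intro a b _ _
    simp only [markRect, List.range_zero, List.foldl_nil]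
    rw [if_neg (by omega)]
  | succ H ih =>
    obtain ⟨ihs, ihc⟩ := ih (by omega)
    have hunf : markRect g i j (H + 1) W = markRow (markRect g i j H W) (i + H) j W := by
      simp [markRect, List.range_succ]
    obtain ⟨hsh, hcell⟩ := markRow_props (markRect g i j H W) m n (i + H) j W ihs (by omega) hjW
    rw [hunf]
    refine ⟨hsh, ?_⟩
    intro a b ha hb
    rw [hcell a b ha hb, ihc a b ha hb]
    split_ifs <;> first | rfl | omega

theorem innerFold_props (cond : Nat → Nat → Bool) (cs : List (List Int)) (m n i H W J : Nat)
    (f : Nat → Nat → Bool)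
    (hs : GShape cs m n) (hiH : i + H ≤ m) (hJ : ∀ j, j < J → j + W ≤ n)
    (hc : ∀ a b, a < m → b < n → cellD cs a b = if f a b then 1 else 0) :
    GShape ((List.range J).foldl (fun cs' j => if cond i j then markRect cs' i j H W else cs') cs) m n ∧
    ∀ a b, a < m → b < n →
      cellD ((List.range J).foldl (fun cs' j => if cond i j then markRect cs' i j H W else cs') cs) a b =
        if (f a b || (List.range J).any fun j =>
            cond i j && decide (i ≤ a ∧ a < i + H ∧ j ≤ b ∧ b < j + W)) then 1 else 0 := by
  induction J generalizing cs f with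
  | zero =>
    refine ⟨hs, ?_⟩
    intro a b ha hb
    simpa using hc a b ha hb
  | succ J ih =>
    obtain ⟨ihs, ihc⟩ := ih cs f hs (fun j hj => hJ j (by omega)) hc
    set csJ := (List.range J).foldl (fun cs' j => if cond i j then markRect cs' i j H W else cs') cs with hcsJ
    have hunf : (List.range (J + 1)).foldl (fun cs' j => if cond i j then markRect cs' i j H W else cs') cs =
        if cond i J then markRect csJ i J H W else csJ := by
      rw [hcsJ]
      simp [List.range_succ]
    rw [hunf]
    by_cases hcJ : cond i J = true
    · obtain ⟨hsh, hcell⟩ := markRect_props csJ m n i J H W ihs hiH (hJ J (by omega))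
      rw [if_pos hcJ]
      refine ⟨hsh, ?_⟩
      intro a b ha hb
      rw [hcell a b ha hb, ihc a b ha hb]
      simp only [List.range_succ, List.any_append, List.any_cons, List.any_nil, hcJ]
      by_cases hrect : i ≤ a ∧ a < i + H ∧ J ≤ b ∧ b < J + W
      · simp [hrect]
      · simp [hrect]
    · rw [if_neg hcJ]
      refine ⟨ihs, ?_⟩
      intro a b ha hb
      rw [ihc a b ha hb]
      simp only [List.range_succ, List.any_append, List.any_cons, List.any_nil,
        Bool.eq_false_iff.mpr hcJ]
      simp

theorem outerFold_props (cond : Nat → Nat → Bool) (cs : List (List Int)) (m n H W I cntJ : Nat)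
    (f : Nat → Nat → Bool)
    (hs : GShape cs m n) (hI : ∀ i, i < I → i + H ≤ m) (hJ : ∀ j, j < cntJ → j + W ≤ n)
    (hc : ∀ a b, a < m → b < n → cellD cs a b = if f a b then 1 else 0) :
    GShape ((List.range I).foldl (fun cs0 i =>
      (List.range cntJ).foldl (fun cs' j => if cond i j then markRect cs' i j H W else cs') cs0) cs) m n ∧
    ∀ a b, a < m → b < n →
      cellD ((List.range I).foldl (fun cs0 i =>
        (List.range cntJ).foldl (fun cs' j => if cond i j then markRect cs' i j H W else cs') cs0) cs) a b =
        if (f a b || (List.range I).any fun i => (List.range cntJ).any fun j =>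
            cond i j && decide (i ≤ a ∧ a < i + H ∧ j ≤ b ∧ b < j + W)) then 1 else 0 := by
  induction I generalizing cs f with
  | zero =>
    refine ⟨hs, ?_⟩
    intro a b ha hb
    simpa using hc a b ha hb
  | succ I ih =>
    obtain ⟨ihs, ihc⟩ := ih cs f hs (fun i hi => hI i (by omega)) hc
    set csI := (List.range I).foldl (fun cs0 i =>
      (List.range cntJ).foldl (fun cs' j => if cond i j then markRect cs' i j H W else cs') cs0) cs with hcsI
    have hunf : (List.range (I + 1)).foldl (fun cs0 i =>
        (List.range cntJ).foldl (fun cs' j => if cond i j then markRect cs' i j H W else cs') cs0) cs =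
        (List.range cntJ).foldl (fun cs' j => if cond I j then markRect cs' I j H W else cs') csI := by
      rw [hcsI]
      simp [List.range_succ]
    rw [hunf]
    obtain ⟨hsh, hcell⟩ := innerFold_props cond csI m n I H W cntJ
      (fun a b => f a b || (List.range I).any fun i => (List.range cntJ).any fun j =>
        cond i j && decide (i ≤ a ∧ a < i + H ∧ j ≤ b ∧ b < j + W))
      ihs (hI I (by omega)) hJ ihc
    refine ⟨hsh, ?_⟩
    intro a b ha hb
    rw [hcell a b ha hb]
    simp only [List.range_succ, List.any_append, List.any_cons, List.any_nil]
    congr 1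
    simp [Bool.or_assoc]

theorem stampOK_eq_bFits (g1 g2 : List (List Int)) (h w : Int) (i j : Nat)
    (hh : 1 ≤ h) (hw : 1 ≤ w)
    (hiH : i + h.toNat ≤ g1.length) (hjW : j + w.toNat ≤ g1.headI.length) :
    stampOK ((List.range g1.length).map (fun x => (List.range g1.headI.length).map (fun y =>
        cellD g2 x y - cellD g1 x y))) i j h.toNat w.toNat
      = bFits g1 g2 h w (i : Int) (j : Int) := by
  rw [Bool.eq_iff_iff]
  simp only [stampOK, bFits, List.all_eq_true, List.mem_range, PySem.List.mem_pyRange_one]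
  constructor
  · intro hA x hx y hy
    have hx0 : 0 ≤ x := le_trans (by positivity) hx.1
    have hy0 : 0 ≤ y := le_trans (by positivity) hy.1
    have hdx : x.toNat = i + (x.toNat - i) ∧ x.toNat - i < h.toNat := by omega
    have hdy : y.toNat = j + (y.toNat - j) ∧ y.toNat - j < w.toNat := by omega
    have := hA (x.toNat - i) hdx.2 (y.toNat - j) hdy.2
    rw [cellD_map_range _ _ _ _ _ (by omega) (by omega)] at this
    rw [← hdx.1, ← hdy.1] at this
    simpa using this
  · intro hB dx hdx dy hdy
    have := hB ((i : Int) + dx) (by constructor <;> omega) ((j : Int) + dy) (by constructor <;> omega)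
    rw [cellD_map_range _ _ _ _ _ (by omega) (by omega)]
    have hx : ((i : Int) + dx).toNat = i + dx := by omega
    have hy : ((j : Int) + dy).toNat = j + dy := by omega
    rw [hx, hy] at this
    simpa using this

theorem covered_eq (g1 g2 : List (List Int)) (h w : Int) (a b : Nat)
    (hh : 1 ≤ h) (hw : 1 ≤ w) (ha : a < g1.length) (hb : b < g1.headI.length) :
    ((List.range ((g1.length : Int) - h + 1).toNat).any fun i =>
      (List.range ((g1.headI.length : Int) - w + 1).toNat).any fun j =>
        stampOK ((List.range g1.length).map (fun x => (List.range g1.headI.length).map (fun y =>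
            cellD g2 x y - cellD g1 x y))) i j h.toNat w.toNat &&
          decide (i ≤ a ∧ a < i + h.toNat ∧ j ≤ b ∧ b < j + w.toNat))
      = bCovered g1 g2 g1.length g1.headI.length h w a b := by
  rw [Bool.eq_iff_iff]
  simp only [bCovered, List.any_eq_true, List.mem_range, PySem.List.mem_pyRange_one,
    Bool.and_eq_true, decide_eq_true_eq]
  constructor
  · rintro ⟨i, hi, j, hj, hok, hrect⟩
    refine ⟨(i : Int), ⟨by omega, by omega⟩, (j : Int), ⟨by omega, by omega⟩, ?_⟩
    rw [← stampOK_eq_bFits g1 g2 h w i j hh hw (by omega) (by omega)]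
    exact hok
  · rintro ⟨i, hi, j, hj, hfit⟩
    have hi0 : 0 ≤ i := le_trans (le_max_left _ _) hi.1
    have hj0 : 0 ≤ j := le_trans (le_max_left _ _) hj.1
    refine ⟨i.toNat, by omega, j.toNat, by omega, ?_, by omega⟩
    rw [stampOK_eq_bFits g1 g2 h w i.toNat j.toNat hh hw (by omega) (by omega)]
    have : ((i.toNat : Int)) = i := by omega
    have h2 : ((j.toNat : Int)) = j := by omega
    rw [this, h2]
    exact hfit

theorem canStamp0_props (m n : Nat) :
    GShape ((List.range m).map (fun _ => List.replicate n (0 : Int))) m n ∧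
    ∀ a b, a < m → b < n →
      cellD ((List.range m).map (fun _ => List.replicate n (0 : Int))) a b
        = if (fun _ _ => false : Nat → Nat → Bool) a b then 1 else 0 := by
  refine ⟨⟨by simp, ?_⟩, ?_⟩
  · intro x hx
    simp [List.getD_eq_getElem?_getD, hx]
  · intro a b ha hb
    simp [cellD, List.getD_eq_getElem?_getD, ha]

theorem markRect_id_of_deg (g : List (List Int)) (i j H W : Nat) (hdeg : H = 0 ∨ W = 0) :
    markRect g i j H W = g := by
  rcases hdeg with hH | hW
  · subst hH; rfl
  · subst hW
    refine List.foldl_fixed' (fun dx => ?_) _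
    rfl

theorem main_eq_deg (g1 g2 : List (List Int)) (h w : Int)
    (hdeg : h ≤ 0 ∨ w ≤ 0) :
    possibleToStamp g1 g2 h w = possibleToStamp_alt g1 g2 h w := by
  unfold possibleToStamp possibleToStamp_alt
  simp only []
  obtain ⟨hs0, hc0⟩ := canStamp0_props g1.length g1.headI.length
  have hdegN : h.toNat = 0 ∨ w.toNat = 0 := by omega
  have hfix : (List.range ((g1.length : Int) - h + 1).toNat).foldl (fun cs i =>
      (List.range ((g1.headI.length : Int) - w + 1).toNat).foldl (fun cs' j =>
        if stampOK ((List.range g1.length).map (fun x => (List.range g1.headI.length).map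
            (fun y => cellD g2 x y - cellD g1 x y))) i j h.toNat w.toNat
        then markRect cs' i j h.toNat w.toNat else cs') cs)
      ((List.range g1.length).map (fun _ => List.replicate g1.headI.length (0 : Int)))
      = (List.range g1.length).map (fun _ => List.replicate g1.headI.length (0 : Int)) := by
    refine List.foldl_fixed' (fun i => ?_) _
    refine List.foldl_fixed' (fun j => ?_) _
    rw [markRect_id_of_deg _ _ _ _ _ hdegN]
    split <;> rfl
  rw [hfix]
  rw [Bool.eq_iff_iff]
  simp only [List.all_eq_true, List.mem_range]
  refine forall_congr' fun a => imp_congr_right fun ha => forall_congr' fun b => imp_congr_right fun hb => ?_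
  rw [hc0 a b ha hb]
  have hcov : bCovered g1 g2 g1.length g1.headI.length h w a b = false := by
    unfold bCovered
    rcases hdeg with hH | hW
    · rw [PySem.List.pyRange_one_eq_nil (by omega)]
      rfl
    · have : ∀ i : Int, ((PySem.List.pyRange (max 0 ((b : Int) - w + 1))
          (min (b : Int) ((g1.headI.length : Int) - w) + 1) 1).any fun j =>
            bFits g1 g2 h w i j) = false := by
        intro i
        rw [PySem.List.pyRange_one_eq_nil (by omega)]
        rfl
      simp [this]
  rw [hcov]
  cases hxa : (cellD g2 a b == 1) <;> simp

theorem main_eq (g1 g2 : List (List Int)) (h w : Int)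
    (hh : 1 ≤ h) (hw : 1 ≤ w) :
    possibleToStamp g1 g2 h w = possibleToStamp_alt g1 g2 h w := by
  unfold possibleToStamp possibleToStamp_alt
  simp only []
  obtain ⟨hs0, hc0⟩ := canStamp0_props g1.length g1.headI.length
  have hmain := outerFold_props
    (fun i j => stampOK ((List.range g1.length).map (fun x => (List.range g1.headI.length).map
        (fun y => cellD g2 x y - cellD g1 x y))) i j h.toNat w.toNat)
    ((List.range g1.length).map (fun _ => List.replicate g1.headI.length (0 : Int)))
    g1.length g1.headI.length h.toNat w.toNat
    ((g1.length : Int) - h + 1).toNat ((g1.headI.length : Int) - w + 1).toNat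
    (fun _ _ => false) hs0 (by intro i hi; omega) (by intro j hj; omega) hc0
  rw [Bool.eq_iff_iff]
  simp only [List.all_eq_true, List.mem_range]
  refine forall_congr' fun a => imp_congr_right fun ha => forall_congr' fun b => imp_congr_right fun hb => ?_
  rw [hmain.2 a b ha hb]
  simp only [Bool.false_or]
  rw [covered_eq g1 g2 h w a b hh hw ha hb]
  cases hxa : (cellD g2 a b == 1) <;>
    cases hc : bCovered g1 g2 g1.length g1.headI.length h w a b <;> simp

-- ===== VERDICT (by name: the statement is the Claim_ definition above) =====
theorem possibleToStamp_spec : Claim_equal_possibleToStamp := by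
  intro grid1 grid2 stampHeight stampWidth _ _
  unfold Spec_possibleToStamp
  by_cases hdim : 1 ≤ stampHeight ∧ 1 ≤ stampWidth
  · exact main_eq grid1 grid2 stampHeight stampWidth hdim.1 hdim.2
  · exact main_eq_deg grid1 grid2 stampHeight stampWidth (by omega)
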